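-- pv_equiv track=rewrite | github.com/st143575/NERvigator | src/scripts/iob2jsonl.py | create_labels_map
-- ===== SOURCE A (Python) =====
-- def create_labels_map(labeled_sentences: list):
--         cls = 0
--         labels_map = {'O': cls}
--         for labeled_sent in labeled_sentences:
--             for label in labeled_sent:
--                 if label not in labels_map:
--                     cls += 1
--                     labels_map[label] = cls
--
--         return labels_map
-- ===== SOURCE B (Python) =====
-- def create_labels_map(labeled_sentences: list):
--     # Repeated head-strip: number the first remaining label, then filter out
--     # all of its occurrences from the rest; repeat until nothing is left.
--     labels = ['O'] + [label for sent in labeled_sentences for label in sent]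
--     labels_map = {}
--     i = 0
--     while labels:
--         h = labels[0]
--         labels_map[h] = i
--         i += 1
--         labels = [x for x in labels[1:] if x != h]
--     return labels_map
-- ===== Notes on version B (the rewrite author's own statement) =====
-- stated objective: alternative
-- what changed: Replaces A's single pass with a counter and dict-membership test by a repeated head-strip algorithm: flatten with 'O' prepended, then iteratively number the first remaining label and filter every occurrence of it out of the remainder, so no membership test or growing lookup structure is needed.
import Mathlib
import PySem

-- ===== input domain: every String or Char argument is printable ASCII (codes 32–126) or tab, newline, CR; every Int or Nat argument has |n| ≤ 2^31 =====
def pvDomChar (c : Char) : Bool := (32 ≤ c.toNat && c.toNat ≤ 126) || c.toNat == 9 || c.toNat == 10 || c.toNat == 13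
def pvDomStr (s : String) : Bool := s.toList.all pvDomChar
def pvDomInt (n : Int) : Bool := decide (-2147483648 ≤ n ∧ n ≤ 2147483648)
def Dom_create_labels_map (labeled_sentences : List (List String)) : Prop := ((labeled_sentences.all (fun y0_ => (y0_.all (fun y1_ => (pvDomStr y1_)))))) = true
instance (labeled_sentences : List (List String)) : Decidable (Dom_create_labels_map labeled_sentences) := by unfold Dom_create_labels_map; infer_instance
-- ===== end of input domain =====

-- B replaces A's counter-plus-membership-test pass by a repeated head-strip
-- algorithm (number the first remaining label, filter its occurrences out of the
-- rest, repeat); an alternative decomposition, not claimed faster.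

-- ===== PORT A =====
-- the loop body: 'if label not in labels_map: cls += 1; labels_map[label] = cls'
def create_labels_map_step (st : Int × PySem.Dict String Int) (label : String) :
    Int × PySem.Dict String Int :=
  if (st.2).contains label then st else (st.1 + 1, (st.2).insert label (st.1 + 1))

def create_labels_map (labeled_sentences : List (List String)) : List (String × Int) :=
  (labeled_sentences.foldl
      (fun st labeled_sent => labeled_sent.foldl create_labels_map_step st)
      ((0 : Int), PySem.Dict.ofList [("O", 0)])).2.items

-- ===== PORT B =====
-- the while loop: pop the head, record it with the current index, filter it out
-- of the remainder (each recorded key is fresh, so the dict grows by appending)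
def create_labels_map_strip : List String → Int → List (String × Int)
  | [], _ => []
  | h :: t, i => (h, i) :: create_labels_map_strip (t.filter (fun x => x ≠ h)) (i + 1)
termination_by l _ => l.length
decreasing_by
  simp only [List.length_unattach]
  exact Nat.lt_succ_of_le (le_trans (List.length_filter_le _ _) (by simp))

def create_labels_map_alt (labeled_sentences : List (List String)) : List (String × Int) :=
  create_labels_map_strip ("O" :: labeled_sentences.flatten) 0

-- ===== PRECONDITION & SPEC =====
def Spec_create_labels_map (labeled_sentences : List (List String)) (out : List (String × Int)) : Prop := out = create_labels_map_alt labeled_sentences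
instance (labeled_sentences : List (List String)) (out : List (String × Int)) : Decidable (Spec_create_labels_map labeled_sentences out) := by unfold Spec_create_labels_map; infer_instance

-- ===== CLAIM (what is proved, stated in full; the proofs are below) =====
def Claim_equal_create_labels_map : Prop := ∀ (labeled_sentences : List (List String)), Dom_create_labels_map labeled_sentences → Spec_create_labels_map labeled_sentences (create_labels_map labeled_sentences)

-- ===== LEMMAS AND PROOFS =====

-- labels numbered by first-encounter position, starting at i
def pvNum (ks : List String) (i : Int) : List (String × Int) :=
  (PySem.List.enumerate ks i).map (fun p => (p.2, p.1))

theorem pvNum_map_fst (ks : List String) (i : Int) : (pvNum ks i).map (·.1) = ks := by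
  simp [pvNum, Function.comp_def]

theorem pvNum_append_singleton (ks : List String) (i : Int) (x : String) :
    pvNum (ks ++ [x]) i = pvNum ks i ++ [(x, i + (ks.length : Int))] := by
  simp [pvNum, PySem.List.enumerate_append, PySem.List.enumerate_cons,
    PySem.List.enumerate_nil]

theorem pvContains_num (ks : List String) (x : String) :
    (PySem.Dict.mk (pvNum ks 0)).contains x = decide (x ∈ ks) := by
  rw [PySem.Dict.contains_eq_decide_mem_keys]
  have : (PySem.Dict.mk (pvNum ks 0)).keys = ks := by
    simpa [PySem.Dict.keys] using pvNum_map_fst ks 0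
  rw [this]

-- A's inner loop grows the first-encounter list
theorem pvLoop (labels ks : List String) :
    labels.foldl create_labels_map_step ((ks.length : Int) - 1, PySem.Dict.mk (pvNum ks 0)) =
      (((PySem.Set.update ks labels).length : Int) - 1,
        PySem.Dict.mk (pvNum (PySem.Set.update ks labels) 0)) := by
  induction labels generalizing ks with
  | nil => simp [PySem.Set.update]
  | cons x rest ih =>
    rw [List.foldl_cons]
    by_cases hx : x ∈ ks
    · have hc : (PySem.Dict.mk (pvNum ks 0)).contains x = true := by
        rw [pvContains_num]; simp [hx]
      have hstep : create_labels_map_step ((ks.length : Int) - 1, PySem.Dict.mk (pvNum ks 0)) x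
          = ((ks.length : Int) - 1, PySem.Dict.mk (pvNum ks 0)) := by
        simp only [create_labels_map_step, hc, if_true]
      rw [hstep, ih, PySem.Set.update_cons, PySem.Set.add_of_mem hx]
    · have hc : (PySem.Dict.mk (pvNum ks 0)).contains x = false := by
        rw [pvContains_num]; simp [hx]
      have hins : (PySem.Dict.mk (pvNum ks 0)).insert x ((ks.length : Int) - 1 + 1)
          = PySem.Dict.mk (pvNum (ks ++ [x]) 0) := by
        apply PySem.Dict.ext
        rw [PySem.Dict.items_insert_of_not_contains _ _ hc]
        have : ((ks.length : Int) - 1 + 1) = (0 + (ks.length : Int)) := by ring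
        simp [pvNum_append_singleton, this]
      have hstep : create_labels_map_step ((ks.length : Int) - 1, PySem.Dict.mk (pvNum ks 0)) x
          = (((ks ++ [x]).length : Int) - 1, PySem.Dict.mk (pvNum (ks ++ [x]) 0)) := by
        simp only [create_labels_map_step, hc, Bool.false_eq_true, if_false, hins]
        rw [show ((ks.length : Int) - 1 + 1) = (((ks ++ [x]).length : Int) - 1) by simp]
      rw [hstep, ih, PySem.Set.update_cons, PySem.Set.add_of_not_mem hx]

-- adds of elements already in the accumulator are no-ops, so filtering them out changes nothing
theorem pvUpd_filter (t : List String) (s : List String) (x : String) (hx : x ∈ s) :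
    t.foldl PySem.Set.add s = (t.filter (fun y => y ≠ x)).foldl PySem.Set.add s := by
  induction t generalizing s with
  | nil => rfl
  | cons a t ih =>
    by_cases hax : a = x
    · subst hax
      have : PySem.Set.add s a = s := PySem.Set.add_of_mem hx
      simp only [List.filter_cons, decide_eq_true_eq]
      rw [if_neg (by simp), List.foldl_cons, this, ih s hx]
    · simp only [List.filter_cons, decide_eq_true_eq]
      rw [if_pos (by simp [hax]), List.foldl_cons, List.foldl_cons]
      exact ih _ (by rw [PySem.Set.mem_add]; exact Or.inl hx)

-- a head absent from the rest stays in front of all further adds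
theorem pvCons_update (t : List String) (s : List String) (h : String) (hh : h ∉ t) :
    t.foldl PySem.Set.add (h :: s) = h :: t.foldl PySem.Set.add s := by
  induction t generalizing s with
  | nil => rfl
  | cons a t ih =>
    have hah : a ≠ h := fun e => hh (e ▸ List.mem_cons_self)
    have hadd : PySem.Set.add (h :: s) a = h :: PySem.Set.add s a := by
      by_cases ha : a ∈ s
      · rw [PySem.Set.add_of_mem ha, PySem.Set.add_of_mem (by simp [ha])]
      · rw [PySem.Set.add_of_not_mem ha,
          PySem.Set.add_of_not_mem (by simp [ha, hah])]
        rfl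
    rw [List.foldl_cons, List.foldl_cons, hadd,
      ih _ (fun hm => hh (List.mem_cons_of_mem _ hm))]

-- first-occurrence dedup unfolds by stripping the head
theorem pvDedup_cons (h : String) (t : List String) :
    PySem.List.dedup (h :: t) = h :: PySem.List.dedup (t.filter (fun x => x ≠ h)) := by
  simp only [PySem.List.dedup_eq_ofList, PySem.Set.ofList_eq_foldl, List.foldl_cons]
  have h1 : PySem.Set.add [] h = [h] := rfl
  rw [h1, pvUpd_filter t [h] h List.mem_cons_self,
    pvCons_update _ [] h (by simp)]

theorem pvStrip_nil (i : Int) : create_labels_map_strip [] i = [] := by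
  rw [create_labels_map_strip]

theorem pvStrip_cons (h : String) (t : List String) (i : Int) :
    create_labels_map_strip (h :: t) i
      = (h, i) :: create_labels_map_strip (t.filter (fun x => x ≠ h)) (i + 1) := by
  rw [create_labels_map_strip]

-- B's head-strip loop computes the enumeration of the dedup
theorem pvStrip_eq (xs : List String) (i : Int) :
    create_labels_map_strip xs i = pvNum (PySem.List.dedup xs) i := by
  induction hn : xs.length using Nat.strong_induction_on generalizing xs i with
  | _ n ih =>
    cases xs with
    | nil => simp [pvStrip_nil, pvNum, PySem.List.dedup_eq_ofList,
        PySem.Set.ofList, PySem.List.enumerate_nil]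
    | cons h t =>
      rw [pvStrip_cons, pvDedup_cons]
      have hlt : (t.filter (fun x => x ≠ h)).length < n := by
        subst hn; exact Nat.lt_succ_of_le (List.length_filter_le _ _)
      rw [ih _ hlt _ (i + 1) rfl]
      simp [pvNum, PySem.List.enumerate_cons]

-- ===== VERDICT (by name: the statement is the Claim_ definition above) =====
theorem create_labels_map_spec : Claim_equal_create_labels_map := by
  intro ls _
  show create_labels_map ls = create_labels_map_alt ls
  unfold create_labels_map create_labels_map_alt
  rw [← List.foldl_flatten]
  have h0 : ((0 : Int), PySem.Dict.ofList [("O", (0 : Int))])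
      = (((["O"] : List String).length : Int) - 1, PySem.Dict.mk (pvNum ["O"] 0)) := by rfl
  rw [h0, pvLoop, pvStrip_eq]
  have hseq : PySem.List.dedup ("O" :: ls.flatten) = PySem.Set.update ["O"] ls.flatten := by rfl
  rw [hseq]
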